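-- pv_equiv track=rewrite | github.com/Drinkey/git-changelog | gitchangelog/gitchangelog.py | group_by_author
-- ===== SOURCE A (Python) =====
-- from typing import List, Dict
--
-- def group_by_key(key: str, gitlogs) -> Dict:
--     """group `gitlogs` by `key`
--
--     :param key: Which key to group by
--     :type key: str
--     :param gitlogs: The gitlogs List
--     :type gitlogs: List[Dict]
--     :return: Grouped Dict of gitlogs by key
--     :rtype: Dict
--     """
--     result = dict()
--     for _gitlog in gitlogs:
--         _key = _gitlog[key]
--         if _key not in result:
--             result[_key] = list()
--         result[_key].append(_gitlog)
--
--     return result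
--
-- def group_by_author(title: str, gitlogs: List[Dict]) -> str:
--     data = group_by_key('author', gitlogs)
--     markdown = f'# {title}\n\n'
--     for _author, _gitlog_items in data.items():
--         markdown += f"## {_author}\n\n"
--         for _item in _gitlog_items:
--             markdown += f"- **{_item['date']}** {_item['type']} `{_item['scope']}` {_item['title']}\n"
--         markdown += "\n"
--     return markdown
-- ===== SOURCE B (Python) =====
-- from typing import List, Dict
--
--
-- def group_by_author(title: str, gitlogs: List[Dict]) -> str:
--     authors = list(dict.fromkeys(g['author'] for g in gitlogs))
--     sections = [
--         "## {}\n\n".format(author)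
--         + "".join(
--             f"- **{g['date']}** {g['type']} `{g['scope']}` {g['title']}\n"
--             for g in gitlogs if g['author'] == author
--         )
--         + "\n"
--         for author in authors
--     ]
--     return f"# {title}\n\n" + "".join(sections)
-- ===== Notes on version B (the rewrite author's own statement) =====
-- stated objective: idiomatic
-- what changed: Replaces A's incrementally-built grouping dict and nested accumulator loops with an order-preserving dedupe of the authors (dict.fromkeys) followed by a per-author filter over the logs, assembling the report with comprehensions and ''.join.
import Mathlib
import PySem

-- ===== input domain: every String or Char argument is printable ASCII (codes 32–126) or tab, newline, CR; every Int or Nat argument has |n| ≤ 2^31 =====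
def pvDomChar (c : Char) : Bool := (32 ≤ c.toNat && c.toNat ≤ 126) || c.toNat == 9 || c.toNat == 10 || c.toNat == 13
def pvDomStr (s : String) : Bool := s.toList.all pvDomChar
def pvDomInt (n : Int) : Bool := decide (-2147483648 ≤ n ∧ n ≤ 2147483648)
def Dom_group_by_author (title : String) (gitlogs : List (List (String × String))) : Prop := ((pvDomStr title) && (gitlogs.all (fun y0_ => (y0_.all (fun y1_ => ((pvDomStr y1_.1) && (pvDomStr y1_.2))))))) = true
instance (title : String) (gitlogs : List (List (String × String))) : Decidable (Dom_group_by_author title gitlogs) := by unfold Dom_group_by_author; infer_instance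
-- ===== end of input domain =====

-- B replaces A's grouping dict with an ordered dedupe of the authors plus a per-author
-- filter-and-join pass (same asymptotic class on typical inputs is NOT claimed faster;
-- objective: idiomatic, byte-identical output).

-- ===== PORT A =====

-- `g[k]` on an input dict (assoc list, first match); default "" is only reached outside Pre_.
def pvLookup (g : List (String × String)) (k : String) : String :=
  (PySem.Dict.mk g).getD k ""

-- the f-string rendering one log line (shared by both Pythons verbatim)
def pvLine (g : List (String × String)) : String :=
  "- **" ++ pvLookup g "date" ++ "** " ++ pvLookup g "type" ++ " `" ++
    pvLookup g "scope" ++ "` " ++ pvLookup g "title" ++ "\n"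

def group_by_key (key : String) (gitlogs : List (List (String × String))) :
    PySem.Dict String (List (List (String × String))) :=
  gitlogs.foldl (fun result g =>
    let k := pvLookup g key
    let result := if result.contains k then result else result.insert k []
    result.insert k (result.getD k [] ++ [g])) PySem.Dict.empty

def group_by_author (title : String) (gitlogs : List (List (String × String))) : String :=
  let data := group_by_key "author" gitlogs
  data.items.foldl (fun markdown p =>
    let markdown := markdown ++ ("## " ++ p.1 ++ "\n\n")
    let markdown := p.2.foldl (fun m item => m ++ pvLine item) markdown
    markdown ++ "\n") ("# " ++ title ++ "\n\n")

-- ===== PORT B =====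

def group_by_author_alt (title : String) (gitlogs : List (List (String × String))) : String :=
  let authors := PySem.List.dedup (gitlogs.map (fun g => pvLookup g "author"))
  let sections := authors.map (fun author =>
    "## " ++ author ++ "\n\n" ++
      PySem.Str.join "" ((gitlogs.filter (fun g => pvLookup g "author" == author)).map pvLine) ++
      "\n")
  "# " ++ title ++ "\n\n" ++ PySem.Str.join "" sections

-- ===== PRECONDITION & SPEC =====

-- Pre_ excludes exactly the inputs on which the Python raises KeyError: some log missing
-- one of the keys 'author', 'date', 'type', 'scope', 'title'.
def Pre_group_by_author (title : String) (gitlogs : List (List (String × String))) : Prop :=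
  ∀ g ∈ gitlogs, ((PySem.Dict.mk g).contains "author" ∧ (PySem.Dict.mk g).contains "date" ∧
    (PySem.Dict.mk g).contains "type" ∧ (PySem.Dict.mk g).contains "scope" ∧
    (PySem.Dict.mk g).contains "title")
instance (title : String) (gitlogs : List (List (String × String))) : Decidable (Pre_group_by_author title gitlogs) := by unfold Pre_group_by_author; infer_instance

def pvWitness_group_by_author : String × (List (List (String × String))) :=
  ("v1.0", [[("author", "al"), ("date", "2020-01-01"), ("type", "feat"), ("scope", "core"), ("title", "init")],
            [("author", "bo"), ("date", "2020-01-02"), ("type", "fix"), ("scope", "ui"), ("title", "bug")],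
            [("author", "al"), ("date", "2020-01-03"), ("type", "docs"), ("scope", "readme"), ("title", "typo")]])

def Spec_group_by_author (title : String) (gitlogs : List (List (String × String))) (out : String) : Prop := out = group_by_author_alt title gitlogs
instance (title : String) (gitlogs : List (List (String × String))) (out : String) : Decidable (Spec_group_by_author title gitlogs out) := by unfold Spec_group_by_author; infer_instance

-- ===== CLAIM (what is proved, stated in full; the proofs are below) =====
def Claim_equal_group_by_author : Prop := ∀ (title : String) (gitlogs : List (List (String × String))), Dom_group_by_author title gitlogs → Pre_group_by_author title gitlogs → Spec_group_by_author title gitlogs (group_by_author title gitlogs)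

-- ===== LEMMAS AND PROOFS =====

theorem pv_intercalate_nil_sep (l : List (List Char)) : [].intercalate l = l.flatten := by
  induction l with
  | nil => simp [List.intercalate]
  | cons a t ih =>
    cases t with
    | nil => simp [List.intercalate]
    | cons b u =>
      simp only [List.intercalate, List.intersperse, List.flatten] at *
      simp_all

theorem pv_join_nil : PySem.Str.join "" ([] : List String) = "" := by
  simp [PySem.Str.join, PySem.Chars.join, pv_intercalate_nil_sep]

theorem pv_join_cons (p : String) (ps : List String) :
    PySem.Str.join "" (p :: ps) = p ++ PySem.Str.join "" ps := by
  simp [PySem.Str.join, PySem.Chars.join, pv_intercalate_nil_sep, String.ofList_append]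

-- an append-accumulating foldl is init ++ ''.join(map f xs)
theorem pv_foldl_cat {α : Type} (f : α → String) (xs : List α) (init : String) :
    xs.foldl (fun m x => m ++ f x) init = init ++ PySem.Str.join "" (xs.map f) := by
  induction xs generalizing init with
  | nil => simp [pv_join_nil]
  | cons a t ih =>
    simp only [List.foldl_cons, List.map_cons]
    rw [ih, pv_join_cons, String.append_assoc]

-- A's grouping step is Dict.modify
theorem pv_step_eq_modify (d : PySem.Dict String (List (List (String × String))))
    (k : String) (g : List (String × String)) :
    (let d' := if d.contains k then d else d.insert k []
     d'.insert k (d'.getD k [] ++ [g])) = d.modify k [] (fun l => l ++ [g]) := by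
  by_cases h : d.contains k
  · simp [h, PySem.Dict.modify]
  · simp only [Bool.not_eq_true] at h
    simp [h, PySem.Dict.modify, PySem.Dict.getD_insert_self, PySem.Dict.insert_insert_self,
      PySem.Dict.getD_of_not_contains d [] h]

theorem pv_group_eq_modify_fold (gitlogs : List (List (String × String))) :
    group_by_key "author" gitlogs =
      gitlogs.foldl (fun d g => d.modify (pvLookup g "author") [] (fun l => l ++ [g]))
        PySem.Dict.empty := by
  unfold group_by_key
  congr 1
  funext d g
  exact pv_step_eq_modify d (pvLookup g "author") g

-- the grouping dict's items: first-seen authors, each with its filtered logs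
theorem pv_items_char (gitlogs : List (List (String × String))) :
    (group_by_key "author" gitlogs).items =
      (PySem.List.dedup (gitlogs.map (fun g => pvLookup g "author"))).map
        (fun a => (a, gitlogs.filter (fun g => pvLookup g "author" == a))) := by
  rw [pv_group_eq_modify_fold]
  have hkeys : (gitlogs.foldl (fun d g => d.modify (pvLookup g "author") [] (fun l => l ++ [g]))
      PySem.Dict.empty).keys = PySem.List.dedup (gitlogs.map (fun g => pvLookup g "author")) := by
    rw [PySem.Dict.keys_foldl_modify_key gitlogs (fun g => pvLookup g "author") []
      (fun _ g l => l ++ [g]) PySem.Dict.empty]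
    simp [PySem.Set.update, PySem.List.dedup_eq_ofList,
      PySem.Set.ofList]
  have hnodup : (gitlogs.foldl (fun d g => d.modify (pvLookup g "author") [] (fun l => l ++ [g]))
      PySem.Dict.empty).keys.Nodup :=
    PySem.Dict.nodup_keys_foldl_modify_key gitlogs (fun g => pvLookup g "author") []
      (fun _ g l => l ++ [g]) PySem.Dict.empty (by simp)
  have hgetD : ∀ a, (gitlogs.foldl (fun d g => d.modify (pvLookup g "author") [] (fun l => l ++ [g]))
      PySem.Dict.empty).getD a [] = gitlogs.filter (fun g => pvLookup g "author" == a) := by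
    intro a
    have hmap : gitlogs.foldl (fun d g => d.modify (pvLookup g "author") [] (fun l => l ++ [g]))
        PySem.Dict.empty =
        (gitlogs.map (fun g => (pvLookup g "author", g))).foldl
          (fun d p => d.modify p.1 [] (fun l => l ++ [p.2])) PySem.Dict.empty := by
      rw [List.foldl_map]
    rw [hmap, PySem.Dict.getD_foldl_modify_append]
    simp [List.filter_map, Function.comp_def]
  rw [PySem.Dict.items_eq_map_keys _ hnodup [], hkeys]
  exact List.map_congr_left (fun a _ => by rw [hgetD a])

-- ===== VERDICT (by name: the statement is the Claim_ definition above) =====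
theorem group_by_author_spec : Claim_equal_group_by_author := by
  intro title gitlogs _ _
  unfold Spec_group_by_author group_by_author group_by_author_alt
  dsimp only
  rw [pv_items_char]
  have houter : ∀ (ps : List (String × List (List (String × String)))) (init : String),
      ps.foldl (fun markdown p =>
        (p.2.foldl (fun m item => m ++ pvLine item) (markdown ++ ("## " ++ p.1 ++ "\n\n"))) ++ "\n")
        init =
      init ++ PySem.Str.join "" (ps.map (fun p =>
        "## " ++ p.1 ++ "\n\n" ++ PySem.Str.join "" (p.2.map pvLine) ++ "\n")) := by
    intro ps
    induction ps with
    | nil => intro init; simp [pv_join_nil]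
    | cons p t ih =>
      intro init
      simp only [List.foldl_cons, List.map_cons]
      rw [pv_foldl_cat, ih, pv_join_cons]
      simp [String.append_assoc]
  rw [houter, List.map_map]
  rfl
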